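-- pv_equiv track=rewrite | github.com/davidhamann/common-passwords | commonpass.py | generate_passwords
-- ===== SOURCE A (Python) =====
-- import itertools
--
-- def generate_passwords(patterns, min_length=None):
--     out = []
--     for pattern in patterns:
--         product = list(itertools.product(*pattern))
--         pattern_result = []
--         for e in product:
--             password = ''.join(e)
--             if not min_length or len(password) >= min_length:
--                 pattern_result.append(password)
--
--         out += pattern_result
--
--     return out
-- ===== SOURCE B (Python) =====
-- def _decode(cols, i):
--     """Mixed-radix decode: index i -> the i-th password of the pattern,
--     with the last column as the fastest-varying digit."""
--     if not cols:
--         return ''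
--     head, rest = cols[0], cols[1:]
--     w = 1
--     for c in rest:
--         w *= len(c)
--     return head[i // w] + _decode(rest, i % w)
--
--
-- def generate_passwords(patterns, min_length=None):
--     out = []
--     for pattern in patterns:
--         cols = [list(c) for c in pattern]
--         total = 1
--         for c in cols:
--             total *= len(c)
--         for i in range(total):
--             pw = _decode(cols, i)
--             if not min_length or len(pw) >= min_length:
--                 out.append(pw)
--     return out
-- ===== Notes on version B (the rewrite author's own statement) =====
-- stated objective: alternative
-- what changed: Replaces per-pattern itertools.product tuple enumeration followed by ''.join with mixed-radix index decoding: it counts i in range(prod of column sizes) and arithmetically decodes each index into a password with // and %, so no product tuples are ever built.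
import Mathlib
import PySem

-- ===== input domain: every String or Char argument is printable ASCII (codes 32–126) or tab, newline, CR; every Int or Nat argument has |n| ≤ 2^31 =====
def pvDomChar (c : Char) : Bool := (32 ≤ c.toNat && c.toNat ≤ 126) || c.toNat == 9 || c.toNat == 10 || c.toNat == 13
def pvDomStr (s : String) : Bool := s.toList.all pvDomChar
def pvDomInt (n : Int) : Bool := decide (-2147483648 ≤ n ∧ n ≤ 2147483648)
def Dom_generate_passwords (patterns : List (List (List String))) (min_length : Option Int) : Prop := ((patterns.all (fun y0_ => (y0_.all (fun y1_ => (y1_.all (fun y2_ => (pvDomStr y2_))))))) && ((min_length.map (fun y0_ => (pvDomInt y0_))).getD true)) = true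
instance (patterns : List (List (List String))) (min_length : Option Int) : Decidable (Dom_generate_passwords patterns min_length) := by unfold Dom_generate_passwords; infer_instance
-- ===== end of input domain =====

-- B replaces A's structural itertools.product enumeration+join by mixed-radix index
-- decoding: it counts i in range(prod of column sizes) and decodes each index
-- arithmetically (// and %) into a password (objective: alternative, same cost).

-- 'not min_length or len(password) >= min_length' (falsy = None or 0), as both Pythons write it
def pyLenOk (min_length : Option Int) (password : String) : Bool :=
  match min_length with
  | none => true
  | some m => decide (m = 0) || decide (PySem.Str.len password ≥ m)

-- ===== PORT A =====
-- itertools.product(*pattern): tuples are List String, in Python's lexicographic order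
def pyProductA (cols : List (List String)) : List (List String) :=
  match cols with
  | [] => [[]]
  | c :: cs => c.flatMap (fun x => (pyProductA cs).map (fun t => x :: t))

def generate_passwords (patterns : List (List (List String))) (min_length : Option Int) : List String :=
  patterns.foldl (fun out pattern =>
    let product := pyProductA pattern
    let pattern_result := product.foldl (fun pr e =>
      let password := PySem.Str.join "" e
      if pyLenOk min_length password then pr ++ [password] else pr) []
    out ++ pattern_result) []

-- ===== PORT B =====
-- 'w = 1; for c in cols: w *= len(c)'
def prodLenB (cols : List (List String)) : Nat :=
  cols.foldl (fun t c => t * c.length) 1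

-- _decode(cols, i); head[i // w] is always in range when called from the port
-- (i < product of all sizes), so getD is exact there
def decodeB (cols : List (List String)) (i : Nat) : String :=
  match cols with
  | [] => ""
  | head :: rest =>
    let w := prodLenB rest
    head.getD (i / w) "" ++ decodeB rest (i % w)

def generate_passwords_alt (patterns : List (List (List String))) (min_length : Option Int) : List String :=
  patterns.foldl (fun out pattern =>
    let total := prodLenB pattern
    (List.range total).foldl (fun out i =>
      let pw := decodeB pattern i
      if pyLenOk min_length pw then out ++ [pw] else out) out) []

-- ===== PRECONDITION & SPEC =====
def Spec_generate_passwords (patterns : List (List (List String))) (min_length : Option Int) (out : List String) : Prop := out = generate_passwords_alt patterns min_length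
instance (patterns : List (List (List String))) (min_length : Option Int) (out : List String) : Decidable (Spec_generate_passwords patterns min_length out) := by unfold Spec_generate_passwords; infer_instance

-- ===== CLAIM (what is proved, stated in full; the proofs are below) =====
def Claim_equal_generate_passwords : Prop := ∀ (patterns : List (List (List String))) (min_length : Option Int), Dom_generate_passwords patterns min_length → Spec_generate_passwords patterns min_length (generate_passwords patterns min_length)

-- ===== LEMMAS AND PROOFS =====

lemma foldl_mul_len (cols : List (List String)) (a : Nat) :
    cols.foldl (fun t c => t * c.length) a = a * prodLenB cols := by
  induction cols generalizing a with
  | nil => simp [prodLenB]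
  | cons c cs ih =>
      simp only [List.foldl_cons, prodLenB] at *
      rw [ih, ih (1 * c.length)]; ring

lemma prodLenB_cons (c : List String) (cs : List (List String)) :
    prodLenB (c :: cs) = c.length * prodLenB cs := by
  simp only [prodLenB, List.foldl_cons, one_mul]
  exact foldl_mul_len cs c.length

lemma range_mul_flatMap (a b : Nat) :
    List.range (a * b) = (List.range a).flatMap (fun q => (List.range b).map (fun r => q * b + r)) := by
  induction a with
  | zero => simp
  | succ a ih =>
      rw [Nat.succ_mul, List.range_add, List.range_succ, List.flatMap_append, ← ih]
      simp

lemma flatMap_getD_range {α : Type} (xs : List String) (F : String → List α) :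
    (List.range xs.length).flatMap (fun q => F (xs.getD q "")) = xs.flatMap F := by
  induction xs with
  | nil => simp
  | cons x xs ih =>
      rw [List.length_cons, List.range_succ_eq_map, List.flatMap_cons, List.flatMap_map]
      simp only [List.getD_cons_zero, List.getD_cons_succ]
      rw [ih, List.flatMap_cons]

lemma chars_join_empty_cons (x : List Char) (t : List (List Char)) :
    PySem.Chars.join [] (x :: t) = x ++ PySem.Chars.join [] t := by
  cases t with
  | nil => simp [PySem.Chars.join_nil, PySem.Chars.join_singleton]
  | cons b r => rw [PySem.Chars.join_cons_cons]; simp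

lemma str_join_empty_cons (x : String) (t : List String) :
    PySem.Str.join "" (x :: t) = x ++ PySem.Str.join "" t := by
  simp [PySem.Str.join, chars_join_empty_cons]

-- the i-th decoded index (i < ∏ sizes) is the join of the i-th product tuple
lemma decode_range_eq_product (cols : List (List String)) :
    (List.range (prodLenB cols)).map (decodeB cols)
      = (pyProductA cols).map (PySem.Str.join "") := by
  induction cols with
  | nil =>
      simp [prodLenB, pyProductA, List.range_succ, decodeB,
        PySem.Str.join, PySem.Chars.join_nil]
  | cons c cs ih =>
      rw [prodLenB_cons, range_mul_flatMap, List.map_flatMap]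
      simp only [List.map_map, Function.comp_def]
      have hstep : (List.range c.length).flatMap
          (fun q => (List.range (prodLenB cs)).map
            (fun r => decodeB (c :: cs) (q * prodLenB cs + r)))
          = (List.range c.length).flatMap
          (fun q => (List.range (prodLenB cs)).map
            (fun r => c.getD q "" ++ decodeB cs r)) := by
        refine List.flatMap_congr (fun q hq => List.map_congr_left (fun r hr => ?_))
        have hrb : r < prodLenB cs := List.mem_range.mp hr
        have hb : 0 < prodLenB cs := Nat.lt_of_le_of_lt (Nat.zero_le r) hrb
        have hdiv : (q * prodLenB cs + r) / prodLenB cs = q := by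
          rw [Nat.add_comm, Nat.mul_comm, Nat.add_mul_div_left _ _ hb,
            Nat.div_eq_of_lt hrb, Nat.zero_add]
        have hmod : (q * prodLenB cs + r) % prodLenB cs = r := by
          rw [Nat.add_comm, Nat.mul_comm, Nat.add_mul_mod_self_left,
            Nat.mod_eq_of_lt hrb]
        simp only [decodeB, hdiv, hmod]
      rw [hstep]
      have hresc : ∀ q : Nat,
          (List.range (prodLenB cs)).map (fun r => c.getD q "" ++ decodeB cs r)
            = (pyProductA cs).map (fun t => c.getD q "" ++ PySem.Str.join "" t) := by
        intro q
        rw [show (fun r => c.getD q "" ++ decodeB cs r)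
              = (fun s => c.getD q "" ++ s) ∘ decodeB cs from rfl,
          ← List.map_map, ih, List.map_map]
        rfl
      simp only [hresc]
      have hflat := flatMap_getD_range c
        (fun x => (pyProductA cs).map (fun t => x ++ PySem.Str.join "" t))
      rw [hflat]
      conv_rhs => rw [pyProductA]
      rw [List.map_flatMap]
      refine List.flatMap_congr (fun x _ => ?_)
      simp only [List.map_map, Function.comp_def, str_join_empty_cons]

-- the two per-pattern inner loops produce the same block
lemma pattern_block (pattern : List (List String)) (min_length : Option Int) (out0 : List String) :
    (List.range (prodLenB pattern)).foldl (fun out i =>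
        let pw := decodeB pattern i
        if pyLenOk min_length pw then out ++ [pw] else out) out0
    = out0 ++ (pyProductA pattern).foldl (fun pr e =>
        let password := PySem.Str.join "" e
        if pyLenOk min_length password then pr ++ [password] else pr) [] := by
  rw [PySem.List.foldl_append_if (fun i => pyLenOk min_length (decodeB pattern i))
        (decodeB pattern) (List.range (prodLenB pattern)) out0,
      PySem.List.foldl_append_if (fun e => pyLenOk min_length (PySem.Str.join "" e))
        (PySem.Str.join "") (pyProductA pattern) []]
  rw [show (fun i => pyLenOk min_length (decodeB pattern i))
        = (pyLenOk min_length ∘ decodeB pattern) from rfl,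
      show (fun e => pyLenOk min_length (PySem.Str.join "" e))
        = (pyLenOk min_length ∘ PySem.Str.join "") from rfl,
      ← List.filter_map, ← List.filter_map, decode_range_eq_product]
  simp

-- ===== VERDICT (by name: the statement is the Claim_ definition above) =====
theorem generate_passwords_spec : Claim_equal_generate_passwords := by
  intro patterns min_length hdom
  clear hdom
  unfold Spec_generate_passwords generate_passwords generate_passwords_alt
  induction patterns using List.reverseRecOn with
  | nil => rfl
  | append_singleton ps p ih =>
      rw [List.foldl_append, List.foldl_append, List.foldl_cons, List.foldl_cons,
        List.foldl_nil, List.foldl_nil, ← ih]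
      simp only
      rw [pattern_block]
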